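-- pv_equiv track=rewrite | github.com/cvetoslav91/Python | FUNDAMENTALS/Text Processing/Exercises/winning_ticket.py | count_consecutive
-- ===== SOURCE A (Python) =====
-- def count_consecutive(symbol, word):
--     current_count = 0
--     total_count = 0
--     counts = []
--     for char in word:
--         if char == symbol:
--             current_count += 1
--         else:
--             current_count = 0
--         counts.append(current_count)
--     max_counts = max(counts)
--     return max_counts
-- ===== SOURCE B (Python) =====
-- def count_consecutive(symbol, word):
--     # Run-skipping scan: jump over each run of `symbol` in one inner sweep,
--     # keeping only the best run length; no counts list, no max() pass.
--     best = 0
--     i = 0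
--     n = len(word)
--     while i < n:
--         if word[i] == symbol:
--             j = i + 1
--             while j < n and word[j] == symbol:
--                 j += 1
--             if j - i > best:
--                 best = j - i
--             i = j
--         else:
--             i += 1
--     return best
-- ===== Notes on version B (the rewrite author's own statement) =====
-- stated objective: alternative
-- what changed: Replaces A's per-character running-counter that builds a counts list and takes max() over it with a two-level run-skipping index scan that jumps over each run of the symbol and keeps only the best run length, allocating nothing.
-- crash fix: On the empty word A raises ValueError (max of an empty list) while B's scan naturally returns 0. — e.g. on count_consecutive("a", ""): A raises ValueError, B returns 0
import Mathlib
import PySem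

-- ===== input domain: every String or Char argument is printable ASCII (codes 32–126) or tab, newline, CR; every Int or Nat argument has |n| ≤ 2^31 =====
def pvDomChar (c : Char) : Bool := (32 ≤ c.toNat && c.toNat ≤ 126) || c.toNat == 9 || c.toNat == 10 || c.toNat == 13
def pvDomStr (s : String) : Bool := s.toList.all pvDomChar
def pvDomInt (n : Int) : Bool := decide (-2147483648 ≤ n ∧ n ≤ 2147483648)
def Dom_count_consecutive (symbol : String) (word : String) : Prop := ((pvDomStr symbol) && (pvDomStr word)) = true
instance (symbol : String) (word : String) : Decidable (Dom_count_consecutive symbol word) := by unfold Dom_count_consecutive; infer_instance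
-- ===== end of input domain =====

-- B replaces A's counts-list + max() with an allocation-free run-skipping index scan (objective: alternative).

-- ===== PORT A =====
-- A: running counter appended to a list per char, then max(counts).
-- (A's `total_count = 0` is dead and not ported.)  max() of [] = ValueError → excluded by Pre_.
def count_consecutive (symbol : String) (word : String) : Int :=
  let res := word.toList.foldl
    (fun (st : Int × List Int) char =>
      let current := if String.mk [char] == symbol then st.1 + 1 else (0 : Int)
      (current, st.2 ++ [current]))
    ((0 : Int), ([] : List Int))
  (PySem.List.max? res.2 (fun x => x)).getD 0

-- ===== PORT B =====
-- inner while: while j < n and word[j] == symbol: j += 1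
def ccInner (symbol : String) (cs : List Char) (j : Nat) : Nat :=
  if h : j < cs.length then
    if String.mk [cs[j]] == symbol then ccInner symbol cs (j + 1) else j
  else j
termination_by cs.length - j

theorem ccInner_ge (symbol : String) (cs : List Char) (j : Nat) : j ≤ ccInner symbol cs j := by
  unfold ccInner
  split
  · split
    · have := ccInner_ge symbol cs (j + 1); omega
    · exact le_refl j
  · exact le_refl j
termination_by cs.length - j

-- outer while over i with best
def ccOuter (symbol : String) (cs : List Char) (i : Nat) (best : Nat) : Nat :=
  if h : i < cs.length then
    if String.mk [cs[i]] == symbol then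
      let j := ccInner symbol cs (i + 1)
      ccOuter symbol cs j (if j - i > best then j - i else best)
    else ccOuter symbol cs (i + 1) best
  else best
termination_by cs.length - i
decreasing_by
  · have := ccInner_ge symbol cs (i + 1); omega
  · omega

def count_consecutive_alt (symbol : String) (word : String) : Int :=
  (ccOuter symbol word.toList 0 0 : Nat)

-- ===== PRECONDITION & SPEC =====
-- Pre_ excludes only the empty word, on which A raises ValueError (max of an empty list).
def Pre_count_consecutive (symbol : String) (word : String) : Prop := word ≠ ""
instance (symbol : String) (word : String) : Decidable (Pre_count_consecutive symbol word) := by unfold Pre_count_consecutive; infer_instance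
def pvWitness_count_consecutive : String × String := ("a", "baaab")

-- On the empty word A raises ValueError (max of an empty list) while B's scan naturally returns 0.
def Raises_count_consecutive (symbol : String) (word : String) : Prop := word = ""
instance (symbol : String) (word : String) : Decidable (Raises_count_consecutive symbol word) := by unfold Raises_count_consecutive; infer_instance
def pvRaiseWitness_count_consecutive : String × String := ("a", "")
def pvRaiseWitnessOut_count_consecutive : Int := 0

def Spec_count_consecutive (symbol : String) (word : String) (out : Int) : Prop := out = count_consecutive_alt symbol word
instance (symbol : String) (word : String) (out : Int) : Decidable (Spec_count_consecutive symbol word out) := by unfold Spec_count_consecutive; infer_instance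

-- ===== CLAIM (what is proved, stated in full; the proofs are below) =====
def Claim_equal_count_consecutive : Prop := ∀ (symbol : String) (word : String), Dom_count_consecutive symbol word → Pre_count_consecutive symbol word → Spec_count_consecutive symbol word (count_consecutive symbol word)
def Claim_raises_count_consecutive : Prop := (∀ (symbol : String) (word : String), Dom_count_consecutive symbol word → Raises_count_consecutive symbol word → ¬ Pre_count_consecutive symbol word) ∧ (Dom_count_consecutive (pvRaiseWitness_count_consecutive.1) (pvRaiseWitness_count_consecutive.2) ∧ Raises_count_consecutive (pvRaiseWitness_count_consecutive.1) (pvRaiseWitness_count_consecutive.2) ∧ count_consecutive_alt (pvRaiseWitness_count_consecutive.1) (pvRaiseWitness_count_consecutive.2) = pvRaiseWitnessOut_count_consecutive)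

-- ===== LEMMAS AND PROOFS =====

-- maximal consecutive run length of p-chars, by runs (the common spec)
def runMax (p : Char → Bool) : List Char → Nat
  | [] => 0
  | c :: t =>
    if p c then max (1 + (t.takeWhile p).length) (runMax p (t.dropWhile p))
    else runMax p t
termination_by l => l.length
decreasing_by
  · have := t.length_dropWhile_le p; simp; omega
  · simp

theorem runMax_cons_pos (p : Char → Bool) (c : Char) (t : List Char) (h : p c = true) :
    runMax p (c :: t) = max (1 + (t.takeWhile p).length) (runMax p (t.dropWhile p)) := by
  rw [runMax, if_pos h]

theorem runMax_cons_neg (p : Char → Bool) (c : Char) (t : List Char) (h : p c = false) :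
    runMax p (c :: t) = runMax p t := by
  rw [runMax, if_neg (by simp [h])]

theorem runMax_unfold (p : Char → Bool) (t : List Char) :
    runMax p t = max (t.takeWhile p).length (runMax p (t.dropWhile p)) := by
  cases t with
  | nil => simp [runMax]
  | cons c t' =>
    by_cases h : p c
    · rw [runMax_cons_pos p c t' h, List.takeWhile_cons, if_pos h, List.dropWhile_cons, if_pos h]
      simp
      omega
    · rw [Bool.not_eq_true] at h
      rw [List.takeWhile_cons, if_neg (by simp [h]), List.dropWhile_cons, if_neg (by simp [h]),
        runMax_cons_neg p c t' h]
      simp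

theorem dropWhile_eq_drop (p : Char → Bool) (l : List Char) :
    l.dropWhile p = l.drop (l.takeWhile p).length := by
  induction l with
  | nil => simp
  | cons c t ih =>
    by_cases h : p c
    · rw [List.dropWhile_cons, if_pos h, List.takeWhile_cons, if_pos h]
      simpa using ih
    · rw [Bool.not_eq_true] at h
      rw [List.dropWhile_cons, if_neg (by simp [h]), List.takeWhile_cons, if_neg (by simp [h])]
      simp

-- A's counts list, as a structural recursion
def countsFrom (p : Char → Bool) (k : Int) : List Char → List Int
  | [] => []
  | c :: t =>
    let k' := if p c then k + 1 else 0
    k' :: countsFrom p k' t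

theorem foldA_eq (symbol : String) (cs : List Char) :
    ∀ (k : Int) (acc : List Int),
    (cs.foldl (fun (st : Int × List Int) char =>
        let current := if String.mk [char] == symbol then st.1 + 1 else (0 : Int)
        (current, st.2 ++ [current])) (k, acc)).2
      = acc ++ countsFrom (fun c => String.mk [c] == symbol) k cs := by
  induction cs with
  | nil => intro k acc; simp [countsFrom]
  | cons c t ih =>
    intro k acc
    simp only [List.foldl, countsFrom]
    rw [ih]
    simp

theorem A1 (p : Char → Bool) (l : List Char) :
    ∀ (k best : Int), 0 ≤ k → k ≤ best →
    (countsFrom p k l).foldl max best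
      = max best (max (k + ((l.takeWhile p).length : Int)) ((runMax p (l.dropWhile p) : Nat) : Int)) := by
  induction l with
  | nil =>
    intro k best hk hkb
    simp [countsFrom, runMax]
    omega
  | cons c t ih =>
    intro k best hk hkb
    by_cases h : p c
    · simp only [countsFrom, h, if_true, List.foldl]
      rw [ih (k + 1) (max best (k + 1)) (by omega) (le_max_right _ _)]
      rw [List.takeWhile_cons, if_pos h, List.dropWhile_cons, if_pos h]
      simp only [List.length_cons]
      push_cast
      omega
    · rw [Bool.not_eq_true] at h
      simp only [countsFrom, h, List.foldl, Bool.false_eq_true, if_false]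
      rw [ih 0 (max best 0) (le_refl 0) (le_max_right _ _)]
      rw [List.takeWhile_cons, if_neg (by simp [h]), List.dropWhile_cons, if_neg (by simp [h])]
      rw [runMax_cons_neg p c t h, runMax_unfold p t]
      simp only [List.length_nil]
      push_cast
      omega

theorem ccInner_eq (symbol : String) (cs : List Char) (j : Nat) :
    ccInner symbol cs j = j + ((cs.drop j).takeWhile (fun c => String.mk [c] == symbol)).length := by
  unfold ccInner
  split
  · rename_i h
    rw [List.drop_eq_getElem_cons h]
    split
    · rename_i hp
      rw [ccInner_eq symbol cs (j + 1)]
      rw [List.takeWhile_cons, if_pos hp]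
      simp
      omega
    · rename_i hp
      rw [List.takeWhile_cons, if_neg hp]
      simp
  · rename_i h
    rw [List.drop_eq_nil_of_le (by omega)]
    simp
termination_by cs.length - j

theorem ccOuter_eq (symbol : String) (cs : List Char) (i : Nat) (best : Nat) :
    ccOuter symbol cs i best = max best (runMax (fun c => String.mk [c] == symbol) (cs.drop i)) := by
  unfold ccOuter
  split
  · rename_i h
    split
    · rename_i hp
      rw [ccOuter_eq symbol cs (ccInner symbol cs (i + 1)) _]
      rw [ccInner_eq symbol cs (i + 1)]
      have hdrop : cs.drop (i + 1 + ((cs.drop (i + 1)).takeWhile (fun c => String.mk [c] == symbol)).length)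
          = (cs.drop (i + 1)).dropWhile (fun c => String.mk [c] == symbol) := by
        rw [← List.drop_drop, dropWhile_eq_drop]
      rw [hdrop]
      rw [List.drop_eq_getElem_cons h,
        runMax_cons_pos (fun c => String.mk [c] == symbol) cs[i] (cs.drop (i + 1)) hp]
      split_ifs <;> omega
    · rename_i hp
      rw [ccOuter_eq symbol cs (i + 1) best]
      rw [List.drop_eq_getElem_cons h,
        runMax_cons_neg (fun c => String.mk [c] == symbol) cs[i] (cs.drop (i + 1)) (by simpa using hp)]
  · rename_i h
    rw [List.drop_eq_nil_of_le (by omega)]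
    simp [runMax]
termination_by cs.length - i
decreasing_by
  all_goals
    have h1 := ccInner_ge symbol cs (i + 1)
    have h2 : i < cs.length := by assumption
    exact Nat.sub_lt_sub_left h2 (by omega)

-- ===== VERDICT (by name: the statement is the Claim_ definition above) =====
theorem count_consecutive_spec : Claim_equal_count_consecutive := by
  intro symbol word _ hpre
  unfold Spec_count_consecutive
  have hne : word.toList ≠ [] := by
    intro h
    exact hpre (by rwa [← String.toList_eq_nil_iff])
  cases hcs : word.toList with
  | nil => exact absurd hcs hne
  | cons c t =>
    simp only [count_consecutive, count_consecutive_alt, hcs]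
    rw [foldA_eq symbol (c :: t) 0 []]
    rw [ccOuter_eq symbol (c :: t) 0 0]
    simp only [List.nil_append, List.drop_zero, countsFrom]
    rw [PySem.List.max?_id_cons]
    simp only [Option.getD_some]
    by_cases h : (String.mk [c] == symbol) = true
    · simp only [h, if_true, zero_add]
      rw [A1 (fun c => String.mk [c] == symbol) t 1 1 (by omega) (le_refl _)]
      rw [runMax_cons_pos (fun c => String.mk [c] == symbol) c t h]
      push_cast
      omega
    · rw [Bool.not_eq_true] at h
      simp only [h, Bool.false_eq_true, if_false]
      rw [A1 (fun c => String.mk [c] == symbol) t 0 0 (le_refl _) (le_refl _)]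
      rw [runMax_cons_neg (fun c => String.mk [c] == symbol) c t h,
        runMax_unfold (fun c => String.mk [c] == symbol) t]
      push_cast
      omega

 theorem count_consecutive_raises : Claim_raises_count_consecutive := by
  unfold Claim_raises_count_consecutive
  constructor
  · exact fun symbol word _ hr hpre => hpre hr
  · refine ⟨by decide, by decide, ?_⟩
    show count_consecutive_alt "a" "" = 0
    unfold count_consecutive_alt
    rw [ccOuter_eq]
    have h0 : ("" : String).toList = [] := rfl
    rw [h0]
    simp [runMax]
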